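/- GENERATED by farm/mkstatement.py from design/units.tsv (unit `qsort`) and the Specs of Vorbis/Spec/*.lean — do not edit.
   THE STATEMENT of the proof unit `qsort`: the function `qsort` (47 instructions) satisfies its contract,
   given the contracts of its callees. What the names mean: Vorbis/Spec/Basic.lean. The theorem to prove:
   `theorem qsort_ok : Vorbis.Spec.qsort.Statement`. -/
import Vorbis.Spec.LibcSort
namespace Vorbis.Spec.qsort
open X86 X86.User Asan

/-- The statement of unit `qsort`. -/
def Statement : Prop :=
  ∀ (Lay : Layout) (_hLay : Lay.hi = 0x1000000) (μ : Microarch) (_hμ : UserX.MicroOK μ) (u₀ : State)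
    (_hcode : HasCodeNat Lay u₀ Vorbis.L.qsort.entry Vorbis.Code.code_qsort.nat Vorbis.L.qsort.size)
    (_h_sift_down : ∀ (others : List Obj) (frames : List (Nat × FrameLayout)) (cmp : Word) (w : Nat), Vorbis.Spec.CmpSpec Lay μ u₀ others frames cmp w → Calls Lay μ Vorbis.WayInv (Vorbis.conv u₀) Vorbis.L.sift_down.entry (Vorbis.Spec.sift_down.spec others frames cmp w))
    (_h_swap_bytes : ∀ (others : List Obj) (frames : List (Nat × FrameLayout)), Calls Lay μ Vorbis.WayInv (Vorbis.conv u₀) Vorbis.L.swap_bytes.entry (Vorbis.Spec.swap_bytes.spec others frames)),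
    ∀ (others : List Obj) (frames : List (Nat × FrameLayout)) (cmp : Word) (w : Nat), Vorbis.Spec.CmpSpec Lay μ u₀ others frames cmp w → Calls Lay μ Vorbis.WayInv (Vorbis.conv u₀) Vorbis.L.qsort.entry (Vorbis.Spec.qsort.spec others frames cmp w)

end Vorbis.Spec.qsort
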